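-- pv_equiv track=rewrite | github.com/tr1ten/DNA | companies/data-bricks/matrix.py | solution
-- ===== SOURCE A (Python) =====
-- def solution(mat):
--     res=(float('inf'),-1,-1)
--     for r in range(len(mat)):
--         for c in range(len(mat[0])):
--             cnt = 0
--             sm = 0
--             for i in range(r+1):
--                 for j in range(c+1):
--                     if mat[i][j]>=0:
--                         cnt+=1
--                         sm +=mat[i][j]
--             if(cnt==0): continue
--             a1 = sm//cnt
--             cnt = 0
--             sm = 0
--
--             for i in range(r+1,len(mat)):
--                 for j in range(c+1):
--                     if mat[i][j]>=0:
--                         cnt+=1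
--                         sm +=mat[i][j]
--             if(cnt==0): continue
--             a2 = sm//cnt
--
--             cnt = 0
--             sm = 0
--             for i in range(0,r+1):
--                 for j in range(c+1,len(mat[0])):
--                     if mat[i][j]>=0:
--                         cnt+=1
--                         sm +=mat[i][j]
--             if(cnt==0): continue
--             a3 = sm//cnt
--             cnt = 0
--             sm = 0
--             for i in range(r+1,len(mat)):
--                 for j in range(c+1,len(mat[0])):
--                     if mat[i][j]>=0:
--                         cnt+=1
--                         sm +=mat[i][j]
--
--             if(cnt==0): continue
--             a4 = sm//cnt
--             val = max(a1,a2,a3,a4)-min(a1,a2,a3,a4)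
--             res = min((val,r,c),res)
--     return res[1:]
-- ===== SOURCE B (Python) =====
-- def solution(mat):
--     m = len(mat)
--     n = len(mat[0]) if mat else 0
--     # C[i][j] / S[i][j]: count / sum of nonnegative entries in mat[0:i][0:j]
--     C = [[0] * (n + 1)]
--     S = [[0] * (n + 1)]
--     for i in range(m):
--         pC, pS = C[i], S[i]
--         rowC, rowS = [0], [0]
--         rc = rs = 0
--         for j in range(n):
--             x = mat[i][j]
--             if x >= 0:
--                 rc += 1
--                 rs += x
--             rowC.append(pC[j + 1] + rc)
--             rowS.append(pS[j + 1] + rs)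
--         C.append(rowC)
--         S.append(rowS)
--
--     def avg(r1, r2, c1, c2):
--         cnt = C[r2][c2] - C[r1][c2] - C[r2][c1] + C[r1][c1]
--         if cnt == 0:
--             return None
--         sm = S[r2][c2] - S[r1][c2] - S[r2][c1] + S[r1][c1]
--         return sm // cnt
--
--     best = None
--     for r in range(m):
--         for c in range(n):
--             a1 = avg(0, r + 1, 0, c + 1)
--             a2 = avg(r + 1, m, 0, c + 1)
--             a3 = avg(0, r + 1, c + 1, n)
--             a4 = avg(r + 1, m, c + 1, n)
--             if a1 is None or a2 is None or a3 is None or a4 is None: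
--                 continue
--             cand = (max(a1, a2, a3, a4) - min(a1, a2, a3, a4), r, c)
--             if best is None or cand < best:
--                 best = cand
--     return (best[1], best[2]) if best else (-1, -1)
-- ===== Notes on version B (the rewrite author's own statement) =====
-- stated objective: faster
-- what changed: B precomputes 2D prefix tables of counts and sums of nonnegative entries once and answers each of the four quadrant queries per split cell in O(1), instead of A's re-scanning all four quadrants with nested loops at every cell.
import Mathlib
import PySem

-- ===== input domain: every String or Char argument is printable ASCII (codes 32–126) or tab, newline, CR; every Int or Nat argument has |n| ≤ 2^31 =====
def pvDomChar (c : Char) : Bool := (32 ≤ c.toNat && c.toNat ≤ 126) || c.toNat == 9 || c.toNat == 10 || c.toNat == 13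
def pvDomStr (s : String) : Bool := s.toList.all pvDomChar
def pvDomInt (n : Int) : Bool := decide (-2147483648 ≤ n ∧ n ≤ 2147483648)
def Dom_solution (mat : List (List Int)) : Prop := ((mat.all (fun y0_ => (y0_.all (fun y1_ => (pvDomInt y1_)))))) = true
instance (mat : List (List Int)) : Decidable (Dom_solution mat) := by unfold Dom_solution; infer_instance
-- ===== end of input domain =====

-- B replaces A's per-cell re-scan of the four quadrants by two 2D prefix tables of
-- nonnegative counts/sums, answering each quadrant in O(1).

-- shared accessor: mat[i][j]; exact under Pre_solution, where every accessed index is in range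
def pvCell (mat : List (List Int)) (i j : Nat) : Int := (mat.getD i []).getD j 0

-- Python tuple comparison '<' on (val, r, c)
def pvLex (a b : Int × Int × Int) : Bool :=
  decide (a.1 < b.1) || (a.1 == b.1 && (decide (a.2.1 < b.2.1) ||
    (a.2.1 == b.2.1 && decide (a.2.2 < b.2.2))))

-- ===== PORT A =====
-- the nested 'for i: for j: if mat[i][j]>=0: cnt+=1; sm+=mat[i][j]' loops
def pvQsum (mat : List (List Int)) (rows cols : List Nat) : Int × Int :=
  rows.foldl (fun p i => cols.foldl (fun q j =>
    if 0 ≤ pvCell mat i j then (q.1 + 1, q.2 + pvCell mat i j) else q) p) (0, 0)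

-- body of A's (r, c) iteration; res = none models A's initial (inf, -1, -1)
def pvStepA (mat : List (List Int)) (m n : Nat) (res : Option (Int × Int × Int))
    (r c : Nat) : Option (Int × Int × Int) :=
  let p1 := pvQsum mat (List.range (r+1)) (List.range (c+1))
  if p1.1 = 0 then res else
  let a1 := PySem.Int.floordiv p1.2 p1.1
  let p2 := pvQsum mat (List.range' (r+1) (m - (r+1))) (List.range (c+1))
  if p2.1 = 0 then res else
  let a2 := PySem.Int.floordiv p2.2 p2.1
  let p3 := pvQsum mat (List.range (r+1)) (List.range' (c+1) (n - (c+1)))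
  if p3.1 = 0 then res else
  let a3 := PySem.Int.floordiv p3.2 p3.1
  let p4 := pvQsum mat (List.range' (r+1) (m - (r+1))) (List.range' (c+1) (n - (c+1)))
  if p4.1 = 0 then res else
  let a4 := PySem.Int.floordiv p4.2 p4.1
  let val := max (max (max a1 a2) a3) a4 - min (min (min a1 a2) a3) a4
  let cand : Int × Int × Int := (val, (r : Int), (c : Int))
  some (match res with
        | none => cand
        | some b => if pvLex b cand then b else cand)   -- min((val,r,c), res)

def solution (mat : List (List Int)) : List Int :=
  match (List.range mat.length).foldl (fun res r =>
          (List.range (mat.headD []).length).foldl (fun res c =>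
            pvStepA mat mat.length (mat.headD []).length res r c) res) none with
  | none => [-1, -1]
  | some b => [b.2.1, b.2.2]

-- ===== PORT B =====
-- builds the (m+1)×(n+1) prefix tables C, S row by row (Source B's first loop)
def pvBuild (mat : List (List Int)) (m n : Nat) : List (List Int) × List (List Int) :=
  (List.range m).foldl (fun CS i =>
    let pC := CS.1.getD i []
    let pS := CS.2.getD i []
    let t := (List.range n).foldl (fun (t : List Int × List Int × Int × Int) j =>
        let x := pvCell mat i j
        let rc := if 0 ≤ x then t.2.2.1 + 1 else t.2.2.1
        let rs := if 0 ≤ x then t.2.2.2 + x else t.2.2.2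
        (t.1 ++ [pC.getD (j+1) 0 + rc], t.2.1 ++ [pS.getD (j+1) 0 + rs], rc, rs))
      (([0], [0], 0, 0) : List Int × List Int × Int × Int)
    (CS.1 ++ [t.1], CS.2 ++ [t.2.1]))
    ([List.replicate (n+1) 0], [List.replicate (n+1) 0])

-- T[r2][c2] - T[r1][c2] - T[r2][c1] + T[r1][c1]
def pvRect (T : List (List Int)) (r1 r2 c1 c2 : Nat) : Int :=
  (T.getD r2 []).getD c2 0 - (T.getD r1 []).getD c2 0
    - (T.getD r2 []).getD c1 0 + (T.getD r1 []).getD c1 0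

-- Source B's avg(r1, r2, c1, c2): none iff the region holds no nonnegative entry
def pvAvg (C S : List (List Int)) (r1 r2 c1 c2 : Nat) : Option Int :=
  if pvRect C r1 r2 c1 c2 = 0 then none
  else some (PySem.Int.floordiv (pvRect S r1 r2 c1 c2) (pvRect C r1 r2 c1 c2))

-- body of Source B's (r, c) iteration
def pvStepB (C S : List (List Int)) (m n : Nat) (best : Option (Int × Int × Int))
    (r c : Nat) : Option (Int × Int × Int) :=
  match pvAvg C S 0 (r+1) 0 (c+1), pvAvg C S (r+1) m 0 (c+1),
        pvAvg C S 0 (r+1) (c+1) n, pvAvg C S (r+1) m (c+1) n with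
  | some a1, some a2, some a3, some a4 =>
    (match best with
     | none => some (max (max (max a1 a2) a3) a4 - min (min (min a1 a2) a3) a4, (r : Int), (c : Int))
     | some b =>
        if pvLex (max (max (max a1 a2) a3) a4 - min (min (min a1 a2) a3) a4, (r : Int), (c : Int)) b
        then some (max (max (max a1 a2) a3) a4 - min (min (min a1 a2) a3) a4, (r : Int), (c : Int))
        else some b)
  | _, _, _, _ => best

def solution_alt (mat : List (List Int)) : List Int :=
  match (List.range mat.length).foldl (fun best r =>
          (List.range (mat.headD []).length).foldl (fun best c =>
            pvStepB (pvBuild mat mat.length (mat.headD []).length).1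
                    (pvBuild mat mat.length (mat.headD []).length).2
                    mat.length (mat.headD []).length best r c) best) none with
  | none => [-1, -1]
  | some b => [b.2.1, b.2.2]

-- ===== PRECONDITION & SPEC =====
-- Pre_ excludes exactly the inputs where A raises IndexError: some row shorter than
-- row 0, so that a scanned index mat[i][c] is out of range (A returns on all others).
def Pre_solution (mat : List (List Int)) : Prop :=
  ∀ row ∈ mat, (mat.headD []).length ≤ row.length
instance (mat : List (List Int)) : Decidable (Pre_solution mat) := by
  unfold Pre_solution; infer_instance

def pvWitness_solution : List (List Int) := [[1, -2], [3, 4]]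

def Spec_solution (mat : List (List Int)) (out : List Int) : Prop := out = solution_alt mat
instance (mat : List (List Int)) (out : List Int) : Decidable (Spec_solution mat out) := by
  unfold Spec_solution; infer_instance

-- ===== CLAIM (what is proved, stated in full; the proofs are below) =====
def Claim_equal_solution : Prop :=
  ∀ (mat : List (List Int)), Dom_solution mat → Pre_solution mat →
    Spec_solution mat (solution mat)

-- ===== LEMMAS AND PROOFS =====

-- specification values: per-row and rectangular count/sum of nonnegative entries
def pvInd (mat : List (List Int)) (i j : Nat) : Int := if 0 ≤ pvCell mat i j then 1 else 0
def pvVal (mat : List (List Int)) (i j : Nat) : Int :=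
  if 0 ≤ pvCell mat i j then pvCell mat i j else 0
def pvRowC (mat : List (List Int)) (i j : Nat) : Int := ((List.range j).map (pvInd mat i)).sum
def pvRowS (mat : List (List Int)) (i j : Nat) : Int := ((List.range j).map (pvVal mat i)).sum
def pvRectC (mat : List (List Int)) (i j : Nat) : Int :=
  ((List.range i).map (fun a => pvRowC mat a j)).sum
def pvRectS (mat : List (List Int)) (i j : Nat) : Int :=
  ((List.range i).map (fun a => pvRowS mat a j)).sum

theorem pv_sum_map_sub (l : List Nat) (f g : Nat → Int) :
    (l.map (fun x => f x - g x)).sum = (l.map f).sum - (l.map g).sum := by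
  induction l with
  | nil => simp
  | cons a l ih => simp [ih]; ring

theorem pv_range_split (a b : Nat) (h : a ≤ b) :
    List.range b = List.range a ++ List.range' a (b - a) := by
  rw [List.range_eq_range', List.range_eq_range']
  have h2 := @List.range'_append 0 a (b - a) 1
  simp only [one_mul, Nat.zero_add] at h2
  rw [h2]
  congr 1
  omega

theorem pv_sum_range' (f : Nat → Int) (a b : Nat) (h : a ≤ b) :
    ((List.range' a (b - a)).map f).sum
      = ((List.range b).map f).sum - ((List.range a).map f).sum := by
  rw [pv_range_split a b h]
  simp

-- inner quadrant loop: adds the column count/sum to the accumulator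
theorem pvQsum_inner (mat : List (List Int)) (i : Nat) (cols : List Nat) (p : Int × Int) :
    cols.foldl (fun q j =>
      if 0 ≤ pvCell mat i j then (q.1 + 1, q.2 + pvCell mat i j) else q) p
      = (p.1 + (cols.map (pvInd mat i)).sum, p.2 + (cols.map (pvVal mat i)).sum) := by
  induction cols generalizing p with
  | nil => simp
  | cons j cols ih =>
    simp only [List.foldl_cons, List.map_cons, List.sum_cons, ih]
    by_cases h : 0 ≤ pvCell mat i j <;>
      simp only [h, Prod.mk.injEq, if_pos, if_neg, not_false_iff, pvInd, pvVal] <;>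
      constructor <;> ring

theorem pvQsum_eq (mat : List (List Int)) (rows cols : List Nat) :
    pvQsum mat rows cols
      = ((rows.map (fun i => (cols.map (pvInd mat i)).sum)).sum,
         (rows.map (fun i => (cols.map (pvVal mat i)).sum)).sum) := by
  unfold pvQsum
  suffices h : ∀ p : Int × Int, rows.foldl (fun p i => cols.foldl (fun q j =>
      if 0 ≤ pvCell mat i j then (q.1 + 1, q.2 + pvCell mat i j) else q) p) p
      = (p.1 + (rows.map (fun i => (cols.map (pvInd mat i)).sum)).sum,
         p.2 + (rows.map (fun i => (cols.map (pvVal mat i)).sum)).sum) by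
    rw [h (0, 0)]; simp
  induction rows with
  | nil => intro p; simp
  | cons i rows ih =>
    intro p
    rw [List.foldl_cons, pvQsum_inner, ih]
    simp only [List.map_cons, List.sum_cons, Prod.mk.injEq]
    constructor <;> ring

theorem pvRowC_zero (mat : List (List Int)) (i : Nat) : pvRowC mat i 0 = 0 := by
  simp [pvRowC]

theorem pvRowS_zero (mat : List (List Int)) (i : Nat) : pvRowS mat i 0 = 0 := by
  simp [pvRowS]

theorem pvRectC_zero_left (mat : List (List Int)) (j : Nat) : pvRectC mat 0 j = 0 := by
  simp [pvRectC]

theorem pvRectS_zero_left (mat : List (List Int)) (j : Nat) : pvRectS mat 0 j = 0 := by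
  simp [pvRectS]

theorem pvRectC_zero_right (mat : List (List Int)) (i : Nat) : pvRectC mat i 0 = 0 := by
  simp [pvRectC, pvRowC_zero]

theorem pvRectS_zero_right (mat : List (List Int)) (i : Nat) : pvRectS mat i 0 = 0 := by
  simp [pvRectS, pvRowS_zero]

theorem pvRowC_succ (mat : List (List Int)) (i k : Nat) :
    pvRowC mat i (k + 1) = pvRowC mat i k + pvInd mat i k := by
  simp [pvRowC, List.range_succ]

theorem pvRowS_succ (mat : List (List Int)) (i k : Nat) :
    pvRowS mat i (k + 1) = pvRowS mat i k + pvVal mat i k := by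
  simp [pvRowS, List.range_succ]

theorem pvRectC_succ (mat : List (List Int)) (i j : Nat) :
    pvRectC mat (i + 1) j = pvRectC mat i j + pvRowC mat i j := by
  simp [pvRectC, List.range_succ]

theorem pvRectS_succ (mat : List (List Int)) (i j : Nat) :
    pvRectS mat (i + 1) j = pvRectS mat i j + pvRowS mat i j := by
  simp [pvRectS, List.range_succ]

-- inner build loop: produces row i+1 of both prefix tables plus the running row totals
theorem pvBuild_inner (mat : List (List Int)) (i n : Nat) (pC pS : List Int)
    (hC : ∀ j, j ≤ n → pC.getD j 0 = pvRectC mat i j)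
    (hS : ∀ j, j ≤ n → pS.getD j 0 = pvRectS mat i j)
    (k : Nat) (hk : k ≤ n) :
    (List.range k).foldl (fun (t : List Int × List Int × Int × Int) j =>
        (t.1 ++ [pC.getD (j+1) 0 + (if 0 ≤ pvCell mat i j then t.2.2.1 + 1 else t.2.2.1)],
         t.2.1 ++ [pS.getD (j+1) 0 + (if 0 ≤ pvCell mat i j then t.2.2.2 + pvCell mat i j else t.2.2.2)],
         (if 0 ≤ pvCell mat i j then t.2.2.1 + 1 else t.2.2.1),
         (if 0 ≤ pvCell mat i j then t.2.2.2 + pvCell mat i j else t.2.2.2)))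
      (([0], [0], 0, 0) : List Int × List Int × Int × Int)
    = ((List.range (k+1)).map (fun b => pvRectC mat (i+1) b),
       (List.range (k+1)).map (fun b => pvRectS mat (i+1) b),
       pvRowC mat i k, pvRowS mat i k) := by
  induction k with
  | zero =>
    simp [pvRowC_zero, pvRowS_zero, pvRectC_succ, pvRectC_zero_right, pvRectS_succ,
      pvRectS_zero_right, List.range_succ]
  | succ k ih =>
    rw [show List.range (k+1) = List.range k ++ [k] from List.range_succ,
        List.foldl_append, ih (by omega)]
    simp only [List.foldl_cons, List.foldl_nil]
    rw [hC (k+1) (by omega), hS (k+1) (by omega)]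
    have hrow : (List.range (k+1+1)).map (fun b => pvRectC mat (i+1) b)
        = (List.range (k+1)).map (fun b => pvRectC mat (i+1) b) ++ [pvRectC mat (i+1) (k+1)] := by
      rw [show List.range (k+1+1) = List.range (k+1) ++ [k+1] from List.range_succ]
      simp
    have hrowS : (List.range (k+1+1)).map (fun b => pvRectS mat (i+1) b)
        = (List.range (k+1)).map (fun b => pvRectS mat (i+1) b) ++ [pvRectS mat (i+1) (k+1)] := by
      rw [show List.range (k+1+1) = List.range (k+1) ++ [k+1] from List.range_succ]
      simp
    rw [hrow, hrowS, pvRectC_succ, pvRectS_succ, pvRowC_succ, pvRowS_succ]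
    by_cases h : 0 ≤ pvCell mat i k <;>
      simp only [h, if_pos, if_neg, not_false_iff, Prod.mk.injEq, pvInd, pvVal,
        List.append_cancel_left_eq, List.cons.injEq, and_true] <;>
      refine ⟨by ring, by ring, by ring, by ring⟩

-- the built tables are the map-tables of rectangular counts / sums
theorem pvBuild_eq (mat : List (List Int)) (m n : Nat) :
    pvBuild mat m n
      = ((List.range (m+1)).map (fun i => (List.range (n+1)).map (fun j => pvRectC mat i j)),
         (List.range (m+1)).map (fun i => (List.range (n+1)).map (fun j => pvRectS mat i j))) := by
  unfold pvBuild
  induction m with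
  | zero =>
    simp only [List.range_zero, List.foldl_nil, Prod.mk.injEq]
    constructor <;>
      · congr 1
        symm
        rw [List.eq_replicate_iff]
        refine ⟨by simp, ?_⟩
        intro x hx
        simp only [List.mem_map, List.mem_range] at hx
        obtain ⟨j, _, rfl⟩ := hx
        simp [pvRectC_zero_left, pvRectS_zero_left]
  | succ m ih =>
    rw [show List.range (m+1) = List.range m ++ [m] from List.range_succ,
        List.foldl_append, ih]
    simp only [List.foldl_cons, List.foldl_nil]
    have gC : ((List.range (m+1)).map
        (fun i => (List.range (n+1)).map (fun j => pvRectC mat i j))).getD m []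
        = (List.range (n+1)).map (fun j => pvRectC mat m j) :=
      PySem.List.getD_map_range _ _ _ _ (by omega)
    have gS : ((List.range (m+1)).map
        (fun i => (List.range (n+1)).map (fun j => pvRectS mat i j))).getD m []
        = (List.range (n+1)).map (fun j => pvRectS mat m j) :=
      PySem.List.getD_map_range _ _ _ _ (by omega)
    rw [gC, gS]
    have h := pvBuild_inner mat m n
      ((List.range (n+1)).map (fun j => pvRectC mat m j))
      ((List.range (n+1)).map (fun j => pvRectS mat m j))
      (fun j hj => PySem.List.getD_map_range _ _ _ _ (by omega))
      (fun j hj => PySem.List.getD_map_range _ _ _ _ (by omega))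
      n (le_refl n)
    rw [h]
    dsimp only
    rw [show List.range (m+1+1) = List.range (m+1) ++ [m+1] from List.range_succ]
    simp

theorem pvBuild_lookup_C (mat : List (List Int)) (m n i j : Nat) (hi : i ≤ m) (hj : j ≤ n) :
    (((pvBuild mat m n).1.getD i []).getD j 0) = pvRectC mat i j := by
  rw [pvBuild_eq]
  dsimp only
  rw [PySem.List.getD_map_range _ _ _ _ (by omega), PySem.List.getD_map_range _ _ _ _ (by omega)]

theorem pvBuild_lookup_S (mat : List (List Int)) (m n i j : Nat) (hi : i ≤ m) (hj : j ≤ n) :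
    (((pvBuild mat m n).2.getD i []).getD j 0) = pvRectS mat i j := by
  rw [pvBuild_eq]
  dsimp only
  rw [PySem.List.getD_map_range _ _ _ _ (by omega), PySem.List.getD_map_range _ _ _ _ (by omega)]

theorem pvLex_asymm (a b : Int × Int × Int) (h : pvLex a b = true) : pvLex b a = false := by
  obtain ⟨a1, a2, a3⟩ := a; obtain ⟨b1, b2, b3⟩ := b
  simp only [pvLex, Bool.or_eq_true, Bool.and_eq_true, decide_eq_true_eq, beq_iff_eq,
    Bool.or_eq_false_iff, Bool.and_eq_false_iff, decide_eq_false_iff_not, not_lt,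
    beq_eq_false_iff_ne, ne_eq] at *
  omega

theorem pvLex_total (a b : Int × Int × Int) (h1 : pvLex a b = false) (h2 : pvLex b a = false) :
    a = b := by
  obtain ⟨a1, a2, a3⟩ := a; obtain ⟨b1, b2, b3⟩ := b
  simp only [pvLex, Bool.or_eq_false_iff, Bool.and_eq_false_iff, decide_eq_false_iff_not,
    not_lt, beq_eq_false_iff_ne, ne_eq, Prod.mk.injEq] at *
  omega

-- Python's  min(cand, res)  vs  'cand if cand < best else best'
theorem pvMin_eq (b cand : Int × Int × Int) :
    (if pvLex b cand then b else cand) = (if pvLex cand b then cand else b) := by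
  by_cases h1 : pvLex b cand
  · rw [if_pos h1, if_neg (by simp [pvLex_asymm _ _ h1])]
  · by_cases h2 : pvLex cand b
    · rw [if_neg h1, if_pos h2]
    · rw [if_neg h1, if_neg h2,
        pvLex_total b cand (Bool.eq_false_iff.mpr h1) (Bool.eq_false_iff.mpr h2)]

-- the four quadrant (cnt, sm) pairs of A, written as prefix-rectangle differences
theorem pvQ1 (mat : List (List Int)) (r c : Nat) :
    pvQsum mat (List.range (r+1)) (List.range (c+1))
      = (pvRectC mat (r+1) (c+1), pvRectS mat (r+1) (c+1)) := by
  rw [pvQsum_eq]; rfl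

theorem pvQ2 (mat : List (List Int)) (m r c : Nat) (h : r + 1 ≤ m) :
    pvQsum mat (List.range' (r+1) (m - (r+1))) (List.range (c+1))
      = (pvRectC mat m (c+1) - pvRectC mat (r+1) (c+1),
         pvRectS mat m (c+1) - pvRectS mat (r+1) (c+1)) := by
  rw [pvQsum_eq, pv_sum_range' _ _ _ h, pv_sum_range' _ _ _ h]
  rfl

theorem pvQ3 (mat : List (List Int)) (n r c : Nat) (h : c + 1 ≤ n) :
    pvQsum mat (List.range (r+1)) (List.range' (c+1) (n - (c+1)))
      = (pvRectC mat (r+1) n - pvRectC mat (r+1) (c+1),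
         pvRectS mat (r+1) n - pvRectS mat (r+1) (c+1)) := by
  rw [pvQsum_eq]
  have hC : (fun i => ((List.range' (c+1) (n - (c+1))).map (pvInd mat i)).sum)
      = fun i => pvRowC mat i n - pvRowC mat i (c+1) := by
    funext i; exact pv_sum_range' _ _ _ h
  have hS : (fun i => ((List.range' (c+1) (n - (c+1))).map (pvVal mat i)).sum)
      = fun i => pvRowS mat i n - pvRowS mat i (c+1) := by
    funext i; exact pv_sum_range' _ _ _ h
  rw [hC, hS, pv_sum_map_sub, pv_sum_map_sub]
  rfl

theorem pvQ4 (mat : List (List Int)) (m n r c : Nat) (hm : r + 1 ≤ m) (hn : c + 1 ≤ n) :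
    pvQsum mat (List.range' (r+1) (m - (r+1))) (List.range' (c+1) (n - (c+1)))
      = (pvRectC mat m n - pvRectC mat (r+1) n - pvRectC mat m (c+1) + pvRectC mat (r+1) (c+1),
         pvRectS mat m n - pvRectS mat (r+1) n - pvRectS mat m (c+1) + pvRectS mat (r+1) (c+1)) := by
  rw [pvQsum_eq]
  have hC : (fun i => ((List.range' (c+1) (n - (c+1))).map (pvInd mat i)).sum)
      = fun i => pvRowC mat i n - pvRowC mat i (c+1) := by
    funext i; exact pv_sum_range' _ _ _ hn
  have hS : (fun i => ((List.range' (c+1) (n - (c+1))).map (pvVal mat i)).sum)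
      = fun i => pvRowS mat i n - pvRowS mat i (c+1) := by
    funext i; exact pv_sum_range' _ _ _ hn
  rw [hC, hS, pv_sum_map_sub, pv_sum_map_sub,
      pv_sum_range' _ _ _ hm, pv_sum_range' _ _ _ hm,
      pv_sum_range' _ _ _ hm, pv_sum_range' _ _ _ hm]
  show ((pvRectC mat m n - pvRectC mat (r+1) n) - (pvRectC mat m (c+1) - pvRectC mat (r+1) (c+1)),
        (pvRectS mat m n - pvRectS mat (r+1) n) - (pvRectS mat m (c+1) - pvRectS mat (r+1) (c+1)))
      = _
  rw [Prod.mk.injEq]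
  constructor <;> ring

-- the two per-cell bodies agree
theorem pvStep_eq (mat : List (List Int)) (m n r c : Nat) (hr : r < m) (hc : c < n)
    (res : Option (Int × Int × Int)) :
    pvStepA mat m n res r c
      = pvStepB (pvBuild mat m n).1 (pvBuild mat m n).2 m n res r c := by
  have hm : r + 1 ≤ m := hr
  have hn : c + 1 ≤ n := hc
  simp only [pvStepA, pvStepB, pvAvg, pvRect]
  rw [pvQ1, pvQ2 mat m r c hm, pvQ3 mat n r c hn, pvQ4 mat m n r c hm hn,
      pvBuild_lookup_C mat m n (r+1) (c+1) hm hn,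
      pvBuild_lookup_C mat m n 0 (c+1) (by omega) hn,
      pvBuild_lookup_C mat m n (r+1) 0 hm (by omega),
      pvBuild_lookup_C mat m n 0 0 (by omega) (by omega),
      pvBuild_lookup_C mat m n m (c+1) (le_refl m) hn,
      pvBuild_lookup_C mat m n m 0 (le_refl m) (by omega),
      pvBuild_lookup_C mat m n (r+1) n hm (le_refl n),
      pvBuild_lookup_C mat m n 0 n (by omega) (le_refl n),
      pvBuild_lookup_C mat m n m n (le_refl m) (le_refl n),
      pvBuild_lookup_S mat m n (r+1) (c+1) hm hn,
      pvBuild_lookup_S mat m n 0 (c+1) (by omega) hn,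
      pvBuild_lookup_S mat m n (r+1) 0 hm (by omega),
      pvBuild_lookup_S mat m n 0 0 (by omega) (by omega),
      pvBuild_lookup_S mat m n m (c+1) (le_refl m) hn,
      pvBuild_lookup_S mat m n m 0 (le_refl m) (by omega),
      pvBuild_lookup_S mat m n (r+1) n hm (le_refl n),
      pvBuild_lookup_S mat m n 0 n (by omega) (le_refl n),
      pvBuild_lookup_S mat m n m n (le_refl m) (le_refl n)]
  simp only [pvRectC_zero_left, pvRectC_zero_right, pvRectS_zero_left, pvRectS_zero_right,
    sub_zero, add_zero]
  by_cases h1 : pvRectC mat (r+1) (c+1) = 0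
  · simp [h1]
  by_cases h2 : pvRectC mat m (c+1) - pvRectC mat (r+1) (c+1) = 0
  · simp [h1, h2]
  by_cases h3 : pvRectC mat (r+1) n - pvRectC mat (r+1) (c+1) = 0
  · simp [h1, h2, h3]
  by_cases h4 : pvRectC mat m n - pvRectC mat (r+1) n - pvRectC mat m (c+1)
      + pvRectC mat (r+1) (c+1) = 0
  · simp [h1, h2, h3, h4]
  simp only [if_neg h1, if_neg h2, if_neg h3, if_neg h4]
  cases res with
  | none => rfl
  | some b =>
    dsimp only
    rw [pvMin_eq, apply_ite some]

-- ===== VERDICT (by name: the statement is the Claim_ definition above) =====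
theorem solution_spec : Claim_equal_solution := by
  intro mat _ _
  unfold Spec_solution solution solution_alt
  rw [PySem.List.foldl_congr_mem _ _ _ none (fun acc r hr =>
    PySem.List.foldl_congr_mem _ _ _ acc (fun acc2 c hc =>
      pvStep_eq mat mat.length (mat.headD []).length r c
        (List.mem_range.mp hr) (List.mem_range.mp hc) acc2))]
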